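-- pv_equiv track=rewrite | github.com/parkdoyeon/Study | Algorithms/hackerrank/compressWord.py | removeNtimes
-- ===== SOURCE A (Python) =====
-- def removeNtimes(arr, N):
--     # found = False
--     # cnt = len(arr)
--     # for i in range(len(arr)-K+1):
--     #     if i != cnt-1 and arr[i] != arr[i+1]:
--     #         continue
--     #     if arr[i]*K == arr[i:i+K]:
--     #         found = True
--     #         return found, arr[:i]+arr[i+K:]
--     # return found, arr
--     buff, cnt = None, 1
--     found = False
--     ret = []
--     for i in range(len(arr)):
--         if buff is None:
--             ret.append(arr[i])
--             buff = arr[i]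
--         else:
--             ret.append(arr[i])
--             if buff == arr[i]:
--                 cnt += 1
--                 if cnt == N:
--                     for _ in range(N):
--                         ret.pop()
--                     found = True
--             else:
--                 buff = arr[i]
--                 cnt = 1
--     return found, ret
-- ===== SOURCE B (Python) =====
-- def removeNtimes(arr, N):
--     # Run-based re-implementation: scan runs of consecutive equal elements;
--     # a run of length >= N (with N >= 2) keeps only its trailing elements.
--     found = False
--     ret = []
--     i = 0
--     n = len(arr)
--     while i < n:
--         j = i
--         while j < n and arr[j] == arr[i]:
--             j += 1
--         if N >= 2 and j - i >= N:
--             found = True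
--             ret.extend(arr[i + N:j])
--         else:
--             ret.extend(arr[i:j])
--         i = j
--     return found, ret
-- ===== Notes on version B (the rewrite author's own statement) =====
-- stated objective: alternative
-- what changed: Replaced A's element-by-element scan with mutable buff/cnt state and N pops from the output on a hit by a run-based scan: find each maximal run of equal elements with an inner pointer and append the run's tail slice (run[N:] when N>=2 and the run is long enough, else the whole run), so no element is ever appended and then removed.
import Mathlib
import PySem

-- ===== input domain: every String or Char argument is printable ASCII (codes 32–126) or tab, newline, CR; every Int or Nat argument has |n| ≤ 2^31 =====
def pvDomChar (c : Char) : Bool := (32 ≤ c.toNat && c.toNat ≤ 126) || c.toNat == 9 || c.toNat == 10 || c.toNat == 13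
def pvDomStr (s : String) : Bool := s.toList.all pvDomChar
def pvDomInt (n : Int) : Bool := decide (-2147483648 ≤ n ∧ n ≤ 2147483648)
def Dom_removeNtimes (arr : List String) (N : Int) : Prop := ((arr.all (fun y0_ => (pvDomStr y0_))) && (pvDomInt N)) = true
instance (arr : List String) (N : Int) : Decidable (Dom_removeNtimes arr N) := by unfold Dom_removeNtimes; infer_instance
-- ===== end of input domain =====

-- B rewrites A's element-by-element scan (buff/cnt state, N pops on a hit) as a run-based
-- scan that appends each run's kept slice directly; same cost, no speed claim (alternative).

-- ===== PORT A =====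
-- 'for _ in range(N): ret.pop()'.  Every pop A performs happens with ret nonempty
-- (the current run has just contributed exactly N trailing elements), where Python's
-- ret.pop() acts on the list value as dropLast.
def pyPopTimes (n : Int) (ret : List String) : List String :=
  (PySem.List.pyRange 0 n 1).foldl (fun r _ => r.dropLast) ret

-- one iteration of A's 'for i in range(len(arr))' body; state = (buff, cnt, found, ret)
def stepA (N : Int) (s : Option String × Int × Bool × List String) (a : String) :
    Option String × Int × Bool × List String :=
  match s with
  | (none, cnt, found, ret) => (some a, cnt, found, ret ++ [a])
  | (some b, cnt, found, ret) =>
      let ret' := ret ++ [a]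
      if b == a then
        let cnt' := cnt + 1
        if cnt' == N then (some b, cnt', true, pyPopTimes N ret')
        else (some b, cnt', found, ret')
      else (some a, (1 : Int), found, ret')

def removeNtimes (arr : List String) (N : Int) : Bool × List String :=
  let s := arr.foldl (stepA N) (none, 1, false, [])
  (s.2.2.1, s.2.2.2)

-- ===== PORT B =====
-- B's outer while-loop over runs; the inner 'while arr[j] == arr[i]' scan is takeWhile/dropWhile
def goB (N : Int) (found : Bool) (ret : List String) : List String → Bool × List String
  | [] => (found, ret)
  | x :: rest =>
      let run := x :: rest.takeWhile (· == x)
      let tail := rest.dropWhile (· == x)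
      if N ≥ 2 ∧ (run.length : Int) ≥ N then goB N true (ret ++ run.drop N.toNat) tail
      else goB N found (ret ++ run) tail
termination_by l => l.length
decreasing_by
  all_goals simpa using Nat.lt_succ_of_le (List.length_dropWhile_le _ _)

def removeNtimes_alt (arr : List String) (N : Int) : Bool × List String :=
  goB N false [] arr

-- ===== PRECONDITION & SPEC =====
def Spec_removeNtimes (arr : List String) (N : Int) (out : Bool × List String) : Prop := out = removeNtimes_alt arr N
instance (arr : List String) (N : Int) (out : Bool × List String) : Decidable (Spec_removeNtimes arr N out) := by unfold Spec_removeNtimes; infer_instance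

-- ===== CLAIM (what is proved, stated in full; the proofs are below) =====
def Claim_equal_removeNtimes : Prop := ∀ (arr : List String) (N : Int), Dom_removeNtimes arr N → Spec_removeNtimes arr N (removeNtimes arr N)

-- ===== LEMMAS AND PROOFS =====

-- dN N c: whether a run followed for c steps has triggered a removal; mN N c: how many
-- of the run's c elements are currently held in ret.
def dN (N c : Int) : Bool := decide (2 ≤ N ∧ N ≤ c)
def mN (N c : Int) : Nat := if 2 ≤ N ∧ N ≤ c then (c - N).toNat else c.toNat

lemma foldl_dropLast_replicate {α β : Type} (r : List β) (l : List α) (x : α) :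
    r.foldl (fun (acc : List α) _ => acc.dropLast) (l ++ List.replicate r.length x) = l := by
  induction r with
  | nil => simp
  | cons b r ih =>
      have h : l ++ List.replicate (b :: r).length x
          = (l ++ List.replicate r.length x) ++ [x] := by
        simp [List.replicate_succ' , List.append_assoc]
      simp only [List.foldl_cons, h, List.dropLast_concat]
      exact ih

lemma pyPopTimes_replicate (N : Int) (l : List String) (x : String) :
    pyPopTimes N (l ++ List.replicate N.toNat x) = l := by
  have hlen : (PySem.List.pyRange 0 N 1).length = N.toNat := by
    simp [PySem.List.length_pyRange_one]
  unfold pyPopTimes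
  rw [← hlen]
  exact foldl_dropLast_replicate _ l x

lemma head?_dropWhile {α : Type} (p : α → Bool) :
    ∀ (l : List α) (y : α), (l.dropWhile p).head? = some y → p y = false := by
  intro l
  induction l with
  | nil => intro y h; simp at h
  | cons a l ih =>
      intro y h
      by_cases hp : p a
      · rw [List.dropWhile_cons_of_pos hp] at h; exact ih y h
      · rw [List.dropWhile_cons_of_neg hp] at h
        simp at h
        subst h
        simpa using hp

lemma runA (N : Int) (x : String) :
    ∀ (l : List String), (∀ y ∈ l, y = x) → ∀ (c : Int), 1 ≤ c → ∀ (f : Bool) (ret0 : List String),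
    List.foldl (stepA N) (some x, c, f || dN N c, ret0 ++ List.replicate (mN N c) x) l
      = (some x, c + l.length, f || dN N (c + l.length), ret0 ++ List.replicate (mN N (c + l.length)) x) := by
  intro l
  induction l with
  | nil => intro _ c hc f ret0; simp
  | cons y l ih =>
      intro hall c hc f ret0
      have hy : y = x := hall y (List.mem_cons_self ..)
      subst hy
      have hall' : ∀ z ∈ l, z = y := fun z hz => hall z (List.mem_cons_of_mem _ hz)
      simp only [List.foldl_cons]
      by_cases hN : c + 1 = N
      · -- removal fires at this element
        have hstep : stepA N (some y, c, f || dN N c, ret0 ++ List.replicate (mN N c) y) y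
            = (some y, c + 1, f || dN N (c + 1), ret0 ++ List.replicate (mN N (c + 1)) y) := by
          have hd : dN N c = false := by
            rw [dN, decide_eq_false_iff_not]; omega
          have hm : mN N c = c.toNat := by rw [mN, if_neg (by omega)]
          have hd1 : dN N (c + 1) = true := by
            rw [dN, decide_eq_true_eq]; omega
          have hm1 : mN N (c + 1) = 0 := by rw [mN, if_pos (by omega)]; omega
          have hrep : (ret0 ++ List.replicate (mN N c) y) ++ [y]
              = ret0 ++ List.replicate N.toNat y := by
            rw [hm, List.append_assoc, ← List.replicate_succ']
            congr 2
            omega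
          simp only [stepA, beq_self_eq_true, if_pos, hd, hd1, hm1]
          simp only [hrep]
          rw [if_pos (by exact beq_iff_eq.mpr hN)]
          simp [pyPopTimes_replicate]
        rw [hstep]
        have := ih hall' (c + 1) (by omega) f ret0
        simpa [add_assoc, add_comm, add_left_comm] using this
      · -- no removal at this element
        have hstep : stepA N (some y, c, f || dN N c, ret0 ++ List.replicate (mN N c) y) y
            = (some y, c + 1, f || dN N (c + 1), ret0 ++ List.replicate (mN N (c + 1)) y) := by
          have hd : dN N (c + 1) = dN N c := by
            rw [dN, dN, decide_eq_decide]
            constructor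
            · rintro ⟨h1, h2⟩; exact ⟨h1, by omega⟩
            · rintro ⟨h1, h2⟩; exact ⟨h1, by omega⟩
          have hm : mN N (c + 1) = mN N c + 1 := by
            rw [mN, mN]; by_cases h2 : 2 ≤ N ∧ N ≤ c
            · rw [if_pos (by omega), if_pos h2]; omega
            · rw [if_neg (by omega), if_neg h2]; omega
          simp only [stepA, beq_self_eq_true, if_pos, hd, hm]
          rw [if_neg (by simpa using hN)]
          simp [List.replicate_succ', List.append_assoc]
        rw [hstep]
        have := ih hall' (c + 1) (by omega) f ret0
        simpa [add_assoc, add_comm, add_left_comm] using this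

lemma mainA (N : Int) :
    ∀ (n : Nat) (arr : List String), arr.length ≤ n →
    ∀ (f : Bool) (ret0 : List String) (s : Option String × Int × Bool × List String),
    s.2.2 = (f, ret0) →
    ((s.1 = none ∧ s.2.1 = 1) ∨ (∃ b, s.1 = some b ∧ ∀ y, arr.head? = some y → b ≠ y)) →
    (List.foldl (stepA N) s arr).2.2 = goB N f ret0 arr := by
  intro n
  induction n with
  | zero =>
      intro arr harr f ret0 s hs _
      have : arr = [] := List.eq_nil_of_length_eq_zero (Nat.le_zero.mp harr)
      subst this
      simpa [goB] using hs
  | succ n ih =>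
      intro arr harr f ret0 s hs hgood
      match arr with
      | [] => simpa [goB] using hs
      | x :: xs =>
        -- first step of the run
        have hstep : stepA N s x = (some x, 1, f, ret0 ++ [x]) := by
          obtain ⟨b0, c0, f0, r0⟩ := s
          simp only at hs
          have hf : f0 = f := by have := congrArg Prod.fst hs; simpa using this
          have hr : r0 = ret0 := by have := congrArg Prod.snd hs; simpa using this
          subst hf; subst hr
          rcases hgood with ⟨hb, hc⟩ | ⟨b, hb, hne⟩
          · simp only at hb hc; subst hb; subst hc; simp [stepA]
          · simp only at hb; subst hb
            have : b ≠ x := hne x (by simp)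
            simp [stepA, this]
        set tk := xs.takeWhile (· == x) with htk
        set dr := xs.dropWhile (· == x) with hdr
        have hsplit : xs = tk ++ dr := (List.takeWhile_append_dropWhile).symm
        have htkall : ∀ y ∈ tk, y = x := by
          intro y hy
          have := List.mem_takeWhile_imp (htk ▸ hy)
          exact beq_iff_eq.mp this
        set k := tk.length with hk
        have htkrep : tk = List.replicate k x := List.eq_replicate_of_mem htkall
        -- run the run lemma over tk
        have hrun := runA N x tk htkall 1 (by omega) f ret0
        have hd1 : dN N 1 = false := by rw [dN, decide_eq_false_iff_not]; omega
        have hm1 : mN N 1 = 1 := by rw [mN, if_neg (by omega)]; rfl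
        rw [hd1, hm1, Bool.or_false] at hrun
        simp only [List.replicate_one] at hrun
        have hfold : List.foldl (stepA N) s (x :: xs)
            = List.foldl (stepA N)
                (some x, 1 + (k : Int), f || dN N (1 + k), ret0 ++ List.replicate (mN N (1 + k)) x) dr := by
          rw [List.foldl_cons, hstep, hsplit, List.foldl_append, hrun]
        -- goB on the same list
        have hgoB : goB N f ret0 (x :: xs)
            = if N ≥ 2 ∧ ((k + 1 : Nat) : Int) ≥ N
              then goB N true (ret0 ++ (List.replicate (k + 1) x).drop N.toNat) dr
              else goB N f (ret0 ++ List.replicate (k + 1) x) dr := by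
          rw [goB]
          simp only [← htk, ← hdr, List.length_cons, ← hk]
          rw [show x :: tk = List.replicate (k+1) x from by
                rw [htkrep]; simp [List.replicate_succ]]
        -- tail satisfies the Good invariant
        have hgoodtail : ∀ y, dr.head? = some y → x ≠ y := by
          intro y hy
          have := head?_dropWhile (· == x) xs y (hdr ▸ hy)
          intro hxy
          subst hxy
          simp at this
        have hdrlen : dr.length ≤ n := by
          have h1 : dr.length ≤ xs.length := List.length_dropWhile_le _ _
          have h2 : xs.length ≤ n := by simpa using Nat.succ_le_succ_iff.mp (by simpa using harr)
          omega
        rw [hfold, hgoB]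
        by_cases hcond : 2 ≤ N ∧ N ≤ (1 + k : Int)
        · have hdk : dN N (1 + (k : Int)) = true := by
            rw [dN, decide_eq_true_eq]; exact ⟨hcond.1, hcond.2⟩
          have hmk : mN N (1 + k) = k + 1 - N.toNat := by
            rw [mN, if_pos hcond]; omega
          have hdrop : (List.replicate (k + 1) x).drop N.toNat = List.replicate (k + 1 - N.toNat) x := by
            simp
          rw [if_pos (by constructor <;> [omega; (push_cast; omega)])]
          rw [hdk, hmk, Bool.or_true, hdrop]
          exact ih dr hdrlen true _ _ rfl (Or.inr ⟨x, rfl, hgoodtail⟩)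
        · have hdk : dN N (1 + (k : Int)) = false := by
            rw [dN, decide_eq_false_iff_not]; exact hcond
          have hmk : mN N (1 + k) = k + 1 := by
            rw [mN, if_neg hcond]; omega
          rw [if_neg (by push_cast; omega)]
          rw [hdk, hmk, Bool.or_false]
          exact ih dr hdrlen f _ _ rfl (Or.inr ⟨x, rfl, hgoodtail⟩)

-- ===== VERDICT (by name: the statement is the Claim_ definition above) =====
theorem removeNtimes_spec : Claim_equal_removeNtimes := by
  intro arr N _
  unfold Spec_removeNtimes removeNtimes removeNtimes_alt
  have h := mainA N arr.length arr (le_refl _) false [] (none, 1, false, []) rfl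
      (Or.inl ⟨rfl, rfl⟩)
  simp only [] at h ⊢
  rw [← h]
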